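/- GENERATED by mk_final_copies.py from the proof of the farm's unit `start_decoder.R4` (farm:start_decoder.R4.2: Proof.lean) as the
   re-elaboration sweep compiled it — do not edit. -/
/-
  Unit `start_decoder.R4`: segment R4 of `start_decoder` (0x115b38 – 0x115be1, stb_vorbis_fixed.c 4055 – 4063):
  `for (j = 0; j < r->classifications; ++j) residue_cascade[j] = …` (three `get_bits`), then
  `r->residue_books = setup_malloc(f, 16·classifications)` (NULL → `error`).

  The assertion inside the segment (`InAt`), its frame lemmas over each kind of step and the cut-point predicates (`HeadJ`,
  `InBody`, `Alloc`, `ErrAt`) are in Lemmas.lean; here: one walk per returned callee state, and the composition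
  (`ReachVia.loop` with the measure `64 − r13`).
-/
import Asan.CheckWalk
import Vorbis.Spec.Units.start_decoder_R4
import Vorbis.Spec.Worked.start_decoder_R4_Lemmas

open X86 X86.User Asan Vorbis Vorbis.Spec Vorbis.Spec.StartDecoder

set_option maxRecDepth 4000
set_option maxHeartbeats 4000000

namespace Vorbis.Spec.start_decoder_R4

/-- 0x115bdc `mov r13d, [rsp+24H] ; jmp 115b7e`: `j = 0` (the literal 0 of Z24), to the loop head. -/
theorem walk_entry (Lay : Layout) (hLay : Lay.hi = 0x1000000) (μ : Microarch) (hμ : UserX.MicroOK μ) (u₀ : State)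
    (hcode : HasCodeNat Lay u₀ Vorbis.L.start_decoder.entry Vorbis.Code.code_start_decoder.nat Vorbis.L.start_decoder.size)
    (g : Ghost) (i : Nat) (A6 A6c : Arena) (A : Arena × List Obj) (v : State) (hb : BodyR4 u₀ g i A6 A6c A v) :
    ReachVia Lay μ WayInv v (HeadJ u₀ g i 0) := by
  have hf := hb.loop.frame
  have he := hf.entry
  v_entry he
  simp only [depth] at he_room he_stack
  have w_rip := hf.rip
  obtain ⟨w_rsp, hR⟩ := rsp_eq hf
  have w_eq : Mem.EqOn Vorbis.L.textLo Vorbis.L.textHi u₀.mem v.mem := hf.code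
  have hdf : v.flags .df = false := (show abiInv _ from hf.inv).1
  have hmx : v.mxcsr &&& 0x1F80 = 0x1F80 := (show abiInv _ from hf.inv).2
  have hsse := Vorbis.sseOK_of_abiInv hf.inv
  have hz24 : v.mem.readLE (g.e.reg .rsp - 1444) 4 = 0 := by
    have hz := hb.loop.mid.consts.z24 (by omega) (by omega)
    have ea : g.e.reg .rsp - 1444 = addr (g.R + 0x24) := by
      unfold addr
      u_omega
    rw [ea]
    exact hz
  u_walk hcode [hμ.vendor] until [Vorbis.L.start_decoder.loop28] span [Vorbis.L.textLo, Vorbis.L.textHi] side (v_side)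
  have hcur : ResCur g (Since A.1 A.1) (Since A.1 A.1) v.mem i 4 :=
    ⟨hb.cur.lt, hb.cur.R3, hb.cur.R4, hb.cur.R5, hb.cur.R6, hb.cur.R7, fun h5 => absurd h5 (by omega),
      fun h6 => absurd h6 (by omega), fun h7 => absurd h7 (by omega)⟩
  have hat : InAt u₀ g i A6 A6c A.1 A pc_R4 v := ⟨hb.loop, hb.rbp, hb.r14, hb.rbx, hcur⟩
  refine ReachVia.done ⟨A6, A6c, A, ?_, ?_, Nat.zero_le _⟩
  · apply hat.move w_mem w_rip (w_kept .rsp rfl) (w_kept .rbp rfl) (w_kept .r14 rfl) (w_kept .rbx rfl)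
    v_inv
  · rw [w_r13]
    rfl

/-- **The loop test** 0x115b7e – 0x115b91 (`lea rdi, [rbx+12] ; call load1 ; movzx eax, [rbx+12] ; movzx edx, al ; cmp edx, r13d ; jg`)
and what follows up to the next callee's return: `j < cls`: `get_bits(f, 3)` returned (0x115b45); else `setup_malloc(f, 16·cls)`
returned (0x115ba2), with either outcome. -/
theorem walk_test (Lay : Layout) (hLay : Lay.hi = 0x1000000) (μ : Microarch) (hμ : UserX.MicroOK μ) (u₀ : State)
    (hcode : HasCodeNat Lay u₀ Vorbis.L.start_decoder.entry Vorbis.Code.code_start_decoder.nat Vorbis.L.start_decoder.size)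
    (h_gb : ∀ (others : List Obj) (frames : List (Nat × FrameLayout)) (Blk : Block → Prop) (len : Nat), Calls Lay μ Vorbis.WayInv (Vorbis.conv u₀) Vorbis.L.get_bits.entry (Vorbis.Spec.get_bits.spec others frames Blk len))
    (h_ld1 : Asan.SmallCheck Lay μ Vorbis.WayInv (Vorbis.CodeOK u₀) [.rax, .rdx] 1 Vorbis.L.__asan_load1_noabort.entry)
    (h_sm : ∀ (others : List Obj) (frames : List (Nat × FrameLayout)) (A : Arena), Calls Lay μ Vorbis.WayInv (Vorbis.conv u₀) Vorbis.L.setup_malloc.entry (Vorbis.Spec.setup_malloc.spec others frames A))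
    (g : Ghost) (i : Nat) (A6 A6c : Arena) (A : Arena × List Obj) (j : Nat) (v : State)
    (h : InAt u₀ g i A6 A6c A.1 A Vorbis.L.start_decoder.loop28 v) (hj : v.reg .r13 = addr j) (hj64 : j ≤ 64) :
    ReachVia Lay μ WayInv v (fun w => InBody u₀ g i Vorbis.L.start_decoder.cut249 j w ∨ Alloc u₀ g i w) := by
  have hf := h.loop.frame
  have he := hf.entry
  v_entry he
  simp only [depth] at he_room he_stack
  have w_rip := hf.rip
  obtain ⟨c_rsp, hR⟩ := rsp_eq hf
  have w_eq : Mem.EqOn Vorbis.L.textLo Vorbis.L.textHi u₀.mem v.mem := hf.code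
  have hdf : v.flags .df = false := (show abiInv _ from hf.inv).1
  have hmx : v.mxcsr &&& 0x1F80 = 0x1F80 := (show abiInv _ from hf.inv).2
  have hsse := Vorbis.sseOK_of_abiInv hf.inv
  have hwr := h.where_r
  have hR6 := h.cur.R6
  obtain ⟨r, hr⟩ : ∃ r, resAt g v.mem i = r := ⟨_, rfl⟩
  rw [hr] at hwr hR6
  have c_rbx := h.rbx
  rw [hr] at c_rbx
  have c_rbp := h.rbp
  have c_r13 := hj
  have hfw := f_where hf h.loop.hand
  have hobr := h.loop.mid.bits.OBR
  simp only [Off.sizeof.stb_vorbis] at hobr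
  have hfa : (addr g.f).toNat = g.f := toNat_addr _ (by omega)
  obtain ⟨cls, hcls⟩ : ∃ c, Residue.classifications v.mem r = c := ⟨_, rfl⟩
  rw [hcls] at hR6
  have lcls : v.mem.readLE (addr r + 12) 1 = cls := by
    rw [← hcls]
    simp only [vfield, vacc, voff]
  have hgb := h_gb A.2 g.frames' (g.Blk A) g.len
  have hsm := h_sm A.2 g.frames' A.1
  u_walk hcode [hμ.vendor] until [Vorbis.L.start_decoder.cut249, Vorbis.L.start_decoder.cut252] span [Vorbis.L.textLo, Vorbis.L.textHi] side (v_side)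
  case check_115b82 =>
    have hun : ShadowUntouched v.mem s_115b82.mem := by v_untouched
    refine h.check_r hun _ 12 1 ?_ (by decide) (by decide)
    rw [hr]
    unfold addr
    u_omega
  case call_inv =>
    v_inv
  case pre_115b40 =>
    have hun : ShadowUntouched v.mem s_115b40.mem := by v_untouched
    have hs : Mem.SameExcept [⟨(g.e.reg .rsp).toNat - 1888, (g.e.reg .rsp).toNat - 1480⟩] v.mem s_115b40.mem := by
      u_same
    refine ⟨h.readerPre hun ?_ ?_ (h.bits_call hs).1, ?_⟩
    · rw [w_rsp]
      u_omega
    · rw [w_rdi]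
      exact hfa
    · unfold bitsArg
      rw [w_rsi]
      decide
  case call_inv =>
    v_inv
  case pre_115b9d =>
    have hun : ShadowUntouched v.mem s_115b9d.mem := by v_untouched
    have hs : Mem.SameExcept [⟨(g.e.reg .rsp).toNat - 1888, (g.e.reg .rsp).toNat - 1480⟩] v.mem s_115b9d.mem := by
      u_same
    refine h.arenaPre hun ?_ ?_ (h.bits_call hs).2
    · rw [w_rsp]
      u_omega
    · rw [w_rdi]
      exact hfa
  · -- after get_bits(f, 3) returned: 0x115b45
    have hread : (v.mem.writeLE (g.e.reg .rsp - 1488) 8 1137543).readLE (addr r + 12) 1 = cls := by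
      rw [read_push _ _ _ _ _ (by u_omega) (by unfold addr; u_omega)]
      exact lcls
    rw [hread] at hbr_115b91
    have hjlt : j < 64 := by
      obtain ⟨e1, e2⟩ := cmp_vals j cls hj64 hR6.2
      rw [e1, e2] at hbr_115b91
      omega
    v_after_call w_rsp_115b40 w_mem_115b40
    simp only [w_rdi_115b40, hfa] at w_same
    have hsame : Mem.SameExcept
        [⟨(g.e.reg .rsp).toNat - 1888, (g.e.reg .rsp).toNat - 1480⟩,
         ⟨g.f + 48, g.f + 56⟩, ⟨g.f + 84, g.f + 96⟩, ⟨g.f + 136, g.f + 144⟩, ⟨g.f + 1484, g.f + 1749⟩,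
         ⟨g.f + 1752, g.f + 1784⟩] v.mem s_115b40r.mem := by
      u_same
    have hpost : GetBitsSpecPost (g.Blk A) g.len (s_115b40.reg .rdi).toNat (bitsArg s_115b40) s_115b40 s_115b40r := w_post
    rw [w_rdi_115b40, hfa] at hpost
    have hat := h.after_reader hsame hpost.bits.bits w_rip (w_rsp.trans c_rsp.symm) (w_kept .rbp rfl) (w_kept .r14 rfl)
      (w_kept .rbx rfl) ((conv_code_iff _ _).mp w_code) w_inv
    refine ReachVia.done (Or.inl ⟨A6, A6c, A, hat, ?_, hjlt⟩)
    rw [w_kept .r13 rfl]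
    exact hj
  · -- after setup_malloc(f, 16·cls) returned: 0x115ba2
    have hread : (v.mem.writeLE (g.e.reg .rsp - 1488) 8 1137543).readLE (addr r + 12) 1 = cls := by
      rw [read_push _ _ _ _ _ (by u_omega) (by unfold addr; u_omega)]
      exact lcls
    have hn : (s_115b9d.reg .rsi).toNat % 2 ^ 32 = 16 * cls := by
      rw [w_rsi_115b9d, hread]
      exact shl4_val cls hR6.2
    have hun0 : ShadowUntouched v.mem s_115b9d.mem := by v_untouched
    have hpost := w_post
    have etop : (s_115b9d.reg .rsp).toNat + 8 = g.R := by
      rw [w_rsp_115b9d]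
      u_omega
    v_after_call w_rsp_115b9d w_mem_115b9d
    simp only [w_rdi_115b9d, hfa, hn] at w_same
    have hsame : Mem.SameExcept
        [⟨(g.e.reg .rsp).toNat - 1888, (g.e.reg .rsp).toNat - 1480⟩, ⟨g.f + 8, g.f + 12⟩, ⟨g.f + 128, g.f + 132⟩,
         shadowSpan (A.1.B + A.1.S + 32) (A.1.B + A.1.S + 32 + 16 * cls)] v.mem s_115b9dr.mem := by
      u_same
    have hpost' : (A.1.Fits ((s_115b9d.reg .rsi).toNat % 2 ^ 32) →
          (s_115b9dr.reg .rax).toNat = A.1.B + A.1.S + 32 ∧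
          ArenaOK (A.1.pushSetup ((s_115b9d.reg .rsi).toNat % 2 ^ 32))
            (A.1.newSetupObj ((s_115b9d.reg .rsi).toNat % 2 ^ 32) :: A.2) s_115b9dr.mem (s_115b9d.reg .rdi).toNat ∧
          ShadowInv (A.1.newSetupObj ((s_115b9d.reg .rsi).toNat % 2 ^ 32) :: A.2) g.frames'
            ((s_115b9d.reg .rsp).toNat + 8) s_115b9dr.mem) ∧
        (¬ A.1.Fits ((s_115b9d.reg .rsi).toNat % 2 ^ 32) →
          s_115b9dr.reg .rax = 0 ∧ ArenaOK A.1 A.2 s_115b9dr.mem (s_115b9d.reg .rdi).toNat ∧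
            ShadowUntouched s_115b9d.mem s_115b9dr.mem ∧
            Mem.SameExcept
              [⟨(s_115b9d.reg .rsp).toNat - 80, (s_115b9d.reg .rsp).toNat⟩,
               ⟨(s_115b9d.reg .rdi).toNat + 8, (s_115b9d.reg .rdi).toNat + 12⟩] s_115b9d.mem s_115b9dr.mem) := hpost
    rw [hn, etop, w_rdi_115b9d, hfa] at hpost'
    have hcodeok : CodeOK u₀ s_115b9dr.mem := (conv_code_iff _ _).mp w_code
    by_cases hfit : A.1.Fits (16 * cls)
    · -- the block was allocated
      obtain ⟨hrax, harena', hsh'⟩ := hpost'.1 hfit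
      obtain ⟨hat, hsince, hc⟩ := h.alloc_ok (16 * cls) (by omega) hfit hsame harena' hsh' w_rip (w_rsp.trans c_rsp.symm)
        (w_kept .rbp rfl) (w_kept .r14 rfl) (w_kept .rbx rfl) hcodeok w_inv
      refine ReachVia.done (Or.inr ⟨A6, A6c, A.1, _, hat, Or.inr ⟨?_, ?_⟩⟩)
      · intro h0
        rw [h0] at hrax
        have : (0 : UInt64).toNat = 0 := rfl
        omega
      · rw [hc, hr, hcls, hrax]
        have e : A.1.B + A.1.S + 32 = A.1.B + (A.1.S + 32) := by omega
        rw [e]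
        exact hsince
    · -- the allocation failed
      -- (contracts v3: the failure path also states its exact footprint; not needed here)
      obtain ⟨hrax, harena', hun', _⟩ := hpost'.2 hfit
      have hun : ShadowUntouched v.mem s_115b9dr.mem := Mem.EqOn.trans hun0 hun'
      have hat := h.alloc_fail (16 * cls) (by omega) hsame hun harena' w_rip (w_rsp.trans c_rsp.symm)
        (w_kept .rbp rfl) (w_kept .r14 rfl) (w_kept .rbx rfl) hcodeok w_inv
      exact ReachVia.done (Or.inr ⟨A6, A6c, A.1, A, hat, Or.inl hrax⟩)
/-- **0x115b45 – 0x115b50** (`mov r12d, eax ; mov esi, 1 ; mov rdi, rbp ; call get_bits`): `low_bits` is kept in r12d (its value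
is irrelevant for safety), `get_bits(f, 1)` returned (0x115b55). -/
theorem walk_b1 (Lay : Layout) (hLay : Lay.hi = 0x1000000) (μ : Microarch) (hμ : UserX.MicroOK μ) (u₀ : State)
    (hcode : HasCodeNat Lay u₀ Vorbis.L.start_decoder.entry Vorbis.Code.code_start_decoder.nat Vorbis.L.start_decoder.size)
    (h_gb : ∀ (others : List Obj) (frames : List (Nat × FrameLayout)) (Blk : Block → Prop) (len : Nat), Calls Lay μ Vorbis.WayInv (Vorbis.conv u₀) Vorbis.L.get_bits.entry (Vorbis.Spec.get_bits.spec others frames Blk len))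
    (g : Ghost) (i : Nat) (j : Nat) (v : State) (hb : InBody u₀ g i Vorbis.L.start_decoder.cut249 j v) :
    ReachVia Lay μ WayInv v (InBody u₀ g i Vorbis.L.start_decoder.cut250 j) := by
  obtain ⟨A6, A6c, A, h, hj, hj64⟩ := hb
  have hf := h.loop.frame
  have he := hf.entry
  v_entry he
  simp only [depth] at he_room he_stack
  have w_rip := hf.rip
  obtain ⟨c_rsp, hR⟩ := rsp_eq hf
  have w_eq : Mem.EqOn Vorbis.L.textLo Vorbis.L.textHi u₀.mem v.mem := hf.code
  have hdf : v.flags .df = false := (show abiInv _ from hf.inv).1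
  have hmx : v.mxcsr &&& 0x1F80 = 0x1F80 := (show abiInv _ from hf.inv).2
  have hsse := Vorbis.sseOK_of_abiInv hf.inv
  have hwr := h.where_r
  obtain ⟨r, hr⟩ : ∃ r, resAt g v.mem i = r := ⟨_, rfl⟩
  rw [hr] at hwr
  have c_rbx := h.rbx
  rw [hr] at c_rbx
  have c_rbp := h.rbp
  have hfw := f_where hf h.loop.hand
  have hobr := h.loop.mid.bits.OBR
  simp only [Off.sizeof.stb_vorbis] at hobr
  have hfa : (addr g.f).toNat = g.f := toNat_addr _ (by omega)
  have hgb := h_gb A.2 g.frames' (g.Blk A) g.len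
  u_walk hcode [hμ.vendor] until [Vorbis.L.start_decoder.cut250] span [Vorbis.L.textLo, Vorbis.L.textHi] side (v_side)
  · v_inv
  · show (get_bits.spec A.2 g.frames' (g.Blk A) g.len).pre s_115b50
    have hun : ShadowUntouched v.mem s_115b50.mem := by v_untouched
    have hs : Mem.SameExcept [⟨(g.e.reg .rsp).toNat - 1888, (g.e.reg .rsp).toNat - 1480⟩] v.mem s_115b50.mem := by
      u_same
    refine ⟨h.readerPre hun ?_ ?_ (h.bits_call hs).1, ?_⟩
    · rw [w_rsp]
      u_omega
    · rw [w_rdi]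
      exact hfa
    · unfold bitsArg
      rw [w_rsi]
      decide
  · -- after get_bits(f, 1) returned: 0x115b55
    v_after_call w_rsp_115b50 w_mem_115b50
    simp only [w_rdi_115b50, hfa] at w_same
    have hsame : Mem.SameExcept
        [⟨(g.e.reg .rsp).toNat - 1888, (g.e.reg .rsp).toNat - 1480⟩,
         ⟨g.f + 48, g.f + 56⟩, ⟨g.f + 84, g.f + 96⟩, ⟨g.f + 136, g.f + 144⟩, ⟨g.f + 1484, g.f + 1749⟩,
         ⟨g.f + 1752, g.f + 1784⟩] v.mem s_115b50r.mem := by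
      u_same
    have hpost : GetBitsSpecPost (g.Blk A) g.len (s_115b50.reg .rdi).toNat (bitsArg s_115b50) s_115b50 s_115b50r := w_post
    rw [w_rdi_115b50, hfa] at hpost
    have hat := h.after_reader hsame hpost.bits.bits w_rip (w_rsp.trans c_rsp.symm) (w_kept .rbp rfl) (w_kept .r14 rfl)
      (w_kept .rbx rfl) ((conv_code_iff _ _).mp w_code) w_inv
    refine ReachVia.done ⟨A6, A6c, A, hat, ?_, hj64⟩
    rw [w_kept .r13 rfl]
    exact hj

/-- **0x115b55 – 0x115b7a** on the path `get_bits(f, 1) = 0` (`high_bits` = the byte `[rsp+10H]`, its value is irrelevant;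
`residue_cascade[j]` checked and stored; `++j`; back to the loop head), and **0x115bcd – 0x115bd5** on the other path
(`get_bits(f, 5)` returned: 0x115bda). -/
theorem walk_b2 (Lay : Layout) (hLay : Lay.hi = 0x1000000) (μ : Microarch) (hμ : UserX.MicroOK μ) (u₀ : State)
    (hcode : HasCodeNat Lay u₀ Vorbis.L.start_decoder.entry Vorbis.Code.code_start_decoder.nat Vorbis.L.start_decoder.size)
    (h_gb : ∀ (others : List Obj) (frames : List (Nat × FrameLayout)) (Blk : Block → Prop) (len : Nat), Calls Lay μ Vorbis.WayInv (Vorbis.conv u₀) Vorbis.L.get_bits.entry (Vorbis.Spec.get_bits.spec others frames Blk len))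
    (h_st1 : Asan.SmallCheck Lay μ Vorbis.WayInv (Vorbis.CodeOK u₀) [.rax, .rdx] 1 Vorbis.L.__asan_store1_noabort.entry)
    (g : Ghost) (i : Nat) (j : Nat) (v : State) (hb : InBody u₀ g i Vorbis.L.start_decoder.cut250 j v) :
    ReachVia Lay μ WayInv v (fun w => InBody u₀ g i Vorbis.L.start_decoder.cut254 j w ∨ HeadJ u₀ g i (j + 1) w) := by
  obtain ⟨A6, A6c, A, h, hj, hj64⟩ := hb
  have hf := h.loop.frame
  have he := hf.entry
  v_entry he
  simp only [depth] at he_room he_stack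
  have w_rip := hf.rip
  obtain ⟨c_rsp, hR⟩ := rsp_eq hf
  have w_eq : Mem.EqOn Vorbis.L.textLo Vorbis.L.textHi u₀.mem v.mem := hf.code
  have hdf : v.flags .df = false := (show abiInv _ from hf.inv).1
  have hmx : v.mxcsr &&& 0x1F80 = 0x1F80 := (show abiInv _ from hf.inv).2
  have hsse := Vorbis.sseOK_of_abiInv hf.inv
  have hwr := h.where_r
  obtain ⟨r, hr⟩ : ∃ r, resAt g v.mem i = r := ⟨_, rfl⟩
  rw [hr] at hwr
  have c_rbx := h.rbx
  rw [hr] at c_rbx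
  have c_rbp := h.rbp
  have hfw := f_where hf h.loop.hand
  have hobr := h.loop.mid.bits.OBR
  simp only [Off.sizeof.stb_vorbis] at hobr
  have hfa : (addr g.f).toNat = g.f := toNat_addr _ (by omega)
  have c_r13 := hj
  have hgb := h_gb A.2 g.frames' (g.Blk A) g.len
  u_walk hcode [hμ.vendor] until [Vorbis.L.start_decoder.cut254, Vorbis.L.start_decoder.loop28] span [Vorbis.L.textLo, Vorbis.L.textHi] side (v_side)
  · v_inv
  · show (get_bits.spec A.2 g.frames' (g.Blk A) g.len).pre s_115bd5
    have hun : ShadowUntouched v.mem s_115bd5.mem := by v_untouched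
    have hs : Mem.SameExcept [⟨(g.e.reg .rsp).toNat - 1888, (g.e.reg .rsp).toNat - 1480⟩] v.mem s_115bd5.mem := by
      u_same
    refine ⟨h.readerPre hun ?_ ?_ (h.bits_call hs).1, ?_⟩
    · rw [w_rsp]
      u_omega
    · rw [w_rdi]
      exact hfa
    · unfold bitsArg
      rw [w_rsi]
      decide
  · -- the check of the store into residue_cascade[j]
    have hun : ShadowUntouched v.mem s_115b6d.mem := by v_untouched
    rw [sext_j j hj64]
    refine h.check_cascade hun _ j hj64 ?_
    unfold addr
    u_omega
  · -- the store misses the text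
    rw [sext_j j hj64]
    unfold addr
    u_omega
  · -- after get_bits(f, 5) returned: 0x115bda
    v_after_call w_rsp_115bd5 w_mem_115bd5
    simp only [w_rdi_115bd5, hfa] at w_same
    have hsame : Mem.SameExcept
        [⟨(g.e.reg .rsp).toNat - 1888, (g.e.reg .rsp).toNat - 1480⟩,
         ⟨g.f + 48, g.f + 56⟩, ⟨g.f + 84, g.f + 96⟩, ⟨g.f + 136, g.f + 144⟩, ⟨g.f + 1484, g.f + 1749⟩,
         ⟨g.f + 1752, g.f + 1784⟩] v.mem s_115bd5r.mem := by
      u_same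
    have hpost : GetBitsSpecPost (g.Blk A) g.len (s_115bd5.reg .rdi).toNat (bitsArg s_115bd5) s_115bd5 s_115bd5r := w_post
    rw [w_rdi_115bd5, hfa] at hpost
    have hat := h.after_reader hsame hpost.bits.bits w_rip (w_rsp.trans c_rsp.symm) (w_kept .rbp rfl) (w_kept .r14 rfl)
      (w_kept .rbx rfl) ((conv_code_iff _ _).mp w_code) w_inv
    refine ReachVia.done (Or.inl ⟨A6, A6c, A, hat, ?_, hj64⟩)
    rw [w_kept .r13 rfl]
    exact hj
  · -- the loop head again, with j + 1
    rw [sext_j j hj64] at w_mem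
    have hb : (g.e.reg .rsp - 1480 + addr j + 192).toNat = (g.e.reg .rsp).toNat - 1288 + j := by
      unfold addr
      u_omega
    have hsame : Mem.SameExcept
        [⟨(g.e.reg .rsp).toNat - 1888, (g.e.reg .rsp).toNat - 1480⟩,
         ⟨(g.e.reg .rsp).toNat - 1288, (g.e.reg .rsp).toNat - 1224⟩] v.mem s_115b7a.mem := by
      u_same
    have hinv : abiInv s_115b7a := by v_inv
    have hat := h.after_stack hsame w_rip (w_rsp.trans c_rsp.symm) (w_kept .rbp rfl) (w_kept .r14 rfl) (w_kept .rbx rfl)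
      w_eq hinv
    refine ReachVia.done (Or.inr ⟨A6, A6c, A, hat, ?_, by omega⟩)
    rw [w_r13]
    exact inc_j j hj64

/-- **0x115bda – 0x115b7a** on the path `get_bits(f, 1) ≠ 0` (`jmp 115b5e`; `high_bits` = the result of `get_bits(f, 5)`, its value
is irrelevant; `residue_cascade[j]` checked and stored; `++j`; back to the loop head). -/
theorem walk_b3 (Lay : Layout) (hLay : Lay.hi = 0x1000000) (μ : Microarch) (hμ : UserX.MicroOK μ) (u₀ : State)
    (hcode : HasCodeNat Lay u₀ Vorbis.L.start_decoder.entry Vorbis.Code.code_start_decoder.nat Vorbis.L.start_decoder.size)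
    (h_st1 : Asan.SmallCheck Lay μ Vorbis.WayInv (Vorbis.CodeOK u₀) [.rax, .rdx] 1 Vorbis.L.__asan_store1_noabort.entry)
    (g : Ghost) (i : Nat) (j : Nat) (v : State) (hb : InBody u₀ g i Vorbis.L.start_decoder.cut254 j v) :
    ReachVia Lay μ WayInv v (HeadJ u₀ g i (j + 1)) := by
  obtain ⟨A6, A6c, A, h, hj, hj64⟩ := hb
  have hf := h.loop.frame
  have he := hf.entry
  v_entry he
  simp only [depth] at he_room he_stack
  have w_rip := hf.rip
  obtain ⟨c_rsp, hR⟩ := rsp_eq hf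
  have w_eq : Mem.EqOn Vorbis.L.textLo Vorbis.L.textHi u₀.mem v.mem := hf.code
  have hdf : v.flags .df = false := (show abiInv _ from hf.inv).1
  have hmx : v.mxcsr &&& 0x1F80 = 0x1F80 := (show abiInv _ from hf.inv).2
  have hsse := Vorbis.sseOK_of_abiInv hf.inv
  have hwr := h.where_r
  obtain ⟨r, hr⟩ : ∃ r, resAt g v.mem i = r := ⟨_, rfl⟩
  rw [hr] at hwr
  have c_rbx := h.rbx
  rw [hr] at c_rbx
  have c_rbp := h.rbp
  have hfw := f_where hf h.loop.hand
  have hobr := h.loop.mid.bits.OBR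
  simp only [Off.sizeof.stb_vorbis] at hobr
  have hfa : (addr g.f).toNat = g.f := toNat_addr _ (by omega)
  have c_r13 := hj
  u_walk hcode [hμ.vendor] until [Vorbis.L.start_decoder.loop28] span [Vorbis.L.textLo, Vorbis.L.textHi] side (v_side)
  · -- the check of the store into residue_cascade[j]
    have hun : ShadowUntouched v.mem s_115b6d.mem := by v_untouched
    rw [sext_j j hj64]
    refine h.check_cascade hun _ j hj64 ?_
    unfold addr
    u_omega
  · -- the store misses the text
    rw [sext_j j hj64]
    unfold addr
    u_omega
  · -- the loop head again, with j + 1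
    rw [sext_j j hj64] at w_mem
    have hb : (g.e.reg .rsp - 1480 + addr j + 192).toNat = (g.e.reg .rsp).toNat - 1288 + j := by
      unfold addr
      u_omega
    have hsame : Mem.SameExcept
        [⟨(g.e.reg .rsp).toNat - 1888, (g.e.reg .rsp).toNat - 1480⟩,
         ⟨(g.e.reg .rsp).toNat - 1288, (g.e.reg .rsp).toNat - 1224⟩] v.mem s_115b7a.mem := by
      u_same
    have hinv : abiInv s_115b7a := by v_inv
    have hat := h.after_stack hsame w_rip (w_rsp.trans c_rsp.symm) (w_kept .rbp rfl) (w_kept .r14 rfl) (w_kept .rbx rfl)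
      w_eq hinv
    refine ReachVia.done ⟨A6, A6c, A, hat, ?_, by omega⟩
    rw [w_r13]
    exact inc_j j hj64

/-- **0x115ba2 – 0x115bc3**: the result is stored (checked: store8 at `r + 24`) BEFORE it is tested; non-NULL: exit to R5 with R8;
NULL: `error(f, VORBIS_outofmem)` returned (0x115bc8). -/
theorem walk_alloc (Lay : Layout) (hLay : Lay.hi = 0x1000000) (μ : Microarch) (hμ : UserX.MicroOK μ) (u₀ : State)
    (hcode : HasCodeNat Lay u₀ Vorbis.L.start_decoder.entry Vorbis.Code.code_start_decoder.nat Vorbis.L.start_decoder.size)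
    (h_st8 : Asan.SmallCheck Lay μ Vorbis.WayInv (Vorbis.CodeOK u₀) [.rax, .rcx, .rdx] 8 Vorbis.L.__asan_store8_noabort.entry)
    (h_err : ∀ (others : List Obj) (frames : List (Nat × FrameLayout)), Calls Lay μ Vorbis.WayInv (Vorbis.conv u₀) Vorbis.L.error.entry (Vorbis.Spec.error.spec others frames))
    (g : Ghost) (i : Nat) (v : State) (hb : Alloc u₀ g i v) :
    ReachVia Lay μ WayInv v (fun w => AtR5 u₀ g i w ∨ ErrAt u₀ g i w) := by
  obtain ⟨A6, A6c, Ai, A, h, hcase⟩ := hb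
  have hf := h.loop.frame
  have he := hf.entry
  v_entry he
  simp only [depth] at he_room he_stack
  have w_rip := hf.rip
  obtain ⟨c_rsp, hR⟩ := rsp_eq hf
  have w_eq : Mem.EqOn Vorbis.L.textLo Vorbis.L.textHi u₀.mem v.mem := hf.code
  have hdf : v.flags .df = false := (show abiInv _ from hf.inv).1
  have hmx : v.mxcsr &&& 0x1F80 = 0x1F80 := (show abiInv _ from hf.inv).2
  have hsse := Vorbis.sseOK_of_abiInv hf.inv
  have hwr := h.where_r
  obtain ⟨r, hr⟩ : ∃ r, resAt g v.mem i = r := ⟨_, rfl⟩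
  rw [hr] at hwr
  have c_rbx := h.rbx
  rw [hr] at c_rbx
  have c_rbp := h.rbp
  have hfw := f_where hf h.loop.hand
  have hobr := h.loop.mid.bits.OBR
  simp only [Off.sizeof.stb_vorbis] at hobr
  have hfa : (addr g.f).toNat = g.f := toNat_addr _ (by omega)
  have herr := h_err A.2 g.frames'
  obtain ⟨x, hx⟩ : ∃ x, v.reg .rax = x := ⟨_, rfl⟩
  have c_rax := hx
  have hxlt : x.toNat < 2 ^ 64 := x.toBitVec.isLt
  have ea : addr r + 24 = addr (r + 24) := by
    unfold addr
    u_omega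
  -- the memory after the check's return address was pushed, and after the store: the assertion holds there (`InAt.store24`)
  have hs1 : Mem.SameExcept
      [⟨(g.e.reg .rsp).toNat - 1888, (g.e.reg .rsp).toNat - 1480⟩,
       ⟨(g.e.reg .rsp).toNat - 1288, (g.e.reg .rsp).toNat - 1224⟩] v.mem
      (v.mem.writeLE (g.e.reg .rsp - 1488) 8 1137582) := by
    apply Mem.SameExcept.writeLE
    · u_omega
    · refine ⟨_, List.mem_cons_self, ?_, ?_⟩
      · simp only []
        u_omega
      · simp only []
        u_omega
  obtain ⟨hat1, hrb1, hc1⟩ := h.store24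
    (s := { v with mem := (v.mem.writeLE (g.e.reg .rsp - 1488) 8 1137582).writeLE (addr (resAt g v.mem i + 24)) 8 x.toNat })
    _ hs1 x.toNat hxlt rfl hf.rip rfl rfl rfl rfl hf.inv
  rw [hr] at hat1 hrb1 hc1
  u_walk hcode [hμ.vendor] until [Vorbis.L.start_decoder.cut260, Vorbis.L.start_decoder.cut253] span [Vorbis.L.textLo, Vorbis.L.textHi] side (v_side)
  · -- the check of the store `r->residue_books = …`
    have hun : ShadowUntouched v.mem s_115ba9.mem := by v_untouched
    refine h.check_r hun _ 24 8 ?_ (by decide) (by decide)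
    rw [hr, ea]
    exact toNat_addr _ (by omega)
  · -- the store misses the text
    rw [ea, toNat_addr _ (by omega)]
    omega
  · v_inv
  · -- the precondition of `error(f, VORBIS_outofmem)`
    show (error.spec A.2 g.frames').pre s_115bc3
    refine hat1.errorPre ?_ ?_ ?_
    · show Mem.EqOn 0xC00000 0xE00000 _ s_115bc3.mem
      rw [w_mem, ea]
      apply Mem.EqOn.writeLE
      · u_omega
      · u_omega
    · rw [w_rsp]
      u_omega
    · rw [w_rdi]
      exact hfa
  · -- the result is not NULL: the exit to R5
    have hmem : s_115bb5.mem =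
        (v.mem.writeLE (g.e.reg .rsp - 1488) 8 1137582).writeLE (addr (resAt g v.mem i + 24)) 8 x.toNat := by
      rw [w_mem, hr, ea]
    have hinv : abiInv s_115bb5 := by v_inv
    obtain ⟨hat, hrb, hc⟩ := h.store24 _ hs1 x.toNat hxlt hmem w_rip (w_rsp.trans c_rsp.symm) (w_kept .rbp rfl)
      (w_kept .r14 rfl) (w_kept .rbx rfl) hinv
    rcases hcase with h0 | ⟨hne, hsince⟩
    · exfalso
      rw [hx] at h0
      rw [h0] at hbr_115bb5
      exact hbr_115bb5 rfl
    · refine ReachVia.done (Or.inl (InAt.toR5 hat ?_))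
      rw [hrb, hc]
      rw [hx] at hsince
      exact hsince
  · -- `error` returned: 0x115bc8
    v_after_call w_rsp_115bc3 w_mem_115bc3
    simp only [w_rdi_115bc3, hfa] at w_same
    rw [ea] at w_same
    have hA : Mem.SameExcept
        [⟨(g.e.reg .rsp).toNat - 1888, (g.e.reg .rsp).toNat - 1480⟩, ⟨g.f + 140, g.f + 144⟩]
        ((v.mem.writeLE (g.e.reg .rsp - 1488) 8 1137582).writeLE (addr (r + 24)) 8 x.toNat)
        (((v.mem.writeLE (g.e.reg .rsp - 1488) 8 1137582).writeLE (addr (r + 24)) 8 x.toNat).writeLE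
          (g.e.reg .rsp - 1488) 8 1137608) := by
      apply Mem.SameExcept.writeLE
      · u_omega
      · refine ⟨_, List.mem_cons_self, ?_, ?_⟩
        · simp only []
          u_omega
        · simp only []
          u_omega
    have hB : Mem.SameExcept
        [⟨(g.e.reg .rsp).toNat - 1888, (g.e.reg .rsp).toNat - 1480⟩, ⟨g.f + 140, g.f + 144⟩]
        (((v.mem.writeLE (g.e.reg .rsp - 1488) 8 1137582).writeLE (addr (r + 24)) 8 x.toNat).writeLE
          (g.e.reg .rsp - 1488) 8 1137608) s_115bc3r.mem := by
      apply w_same.mono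
      intro w hw a h1 h2
      simp only [List.mem_cons, List.mem_nil_iff, or_false] at hw
      rcases hw with rfl | rfl
      · refine ⟨_, List.mem_cons_self, ?_, ?_⟩
        · simp only [] at h1 h2 ⊢
          u_omega
        · simp only [] at h1 h2 ⊢
          u_omega
      · refine ⟨_, List.mem_cons_of_mem _ List.mem_cons_self, ?_, ?_⟩
        · simp only [] at h1 h2 ⊢
          omega
        · simp only [] at h1 h2 ⊢
          omega
    have hat := hat1.after_error (hA.trans hB) w_rip (w_rsp.trans c_rsp.symm) (w_kept .rbp rfl) (w_kept .r14 rfl)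
      (w_kept .rbx rfl) ((conv_code_iff _ _).mp w_code) w_inv
    have hpost : s_115bc3r.reg .rax = 0 := w_post.1
    refine ReachVia.done (Or.inr ⟨A6, A6c, Ai, A, hat, ?_⟩)
    rw [hpost]
    rfl

/-- **0x115bc8** `jmp 113b22`: to the epilogue with eax = 0 (`AtERR`, SD.ERR). -/
theorem walk_err (Lay : Layout) (hLay : Lay.hi = 0x1000000) (μ : Microarch) (hμ : UserX.MicroOK μ) (u₀ : State)
    (hcode : HasCodeNat Lay u₀ Vorbis.L.start_decoder.entry Vorbis.Code.code_start_decoder.nat Vorbis.L.start_decoder.size)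
    (g : Ghost) (i : Nat) (v : State) (hb : ErrAt u₀ g i v) :
    ReachVia Lay μ WayInv v (AtERR u₀ g) := by
  obtain ⟨A6, A6c, Ai, A, h, hrax⟩ := hb
  have hf := h.loop.frame
  have he := hf.entry
  v_entry he
  simp only [depth] at he_room he_stack
  have w_rip := hf.rip
  obtain ⟨c_rsp, hR⟩ := rsp_eq hf
  have w_eq : Mem.EqOn Vorbis.L.textLo Vorbis.L.textHi u₀.mem v.mem := hf.code
  have hdf : v.flags .df = false := (show abiInv _ from hf.inv).1
  have hmx : v.mxcsr &&& 0x1F80 = 0x1F80 := (show abiInv _ from hf.inv).2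
  have hsse := Vorbis.sseOK_of_abiInv hf.inv
  have hwr := h.where_r
  obtain ⟨r, hr⟩ : ∃ r, resAt g v.mem i = r := ⟨_, rfl⟩
  rw [hr] at hwr
  have c_rbx := h.rbx
  rw [hr] at c_rbx
  have c_rbp := h.rbp
  have hfw := f_where hf h.loop.hand
  have hobr := h.loop.mid.bits.OBR
  simp only [Off.sizeof.stb_vorbis] at hobr
  have hfa : (addr g.f).toNat = g.f := toNat_addr _ (by omega)
  u_walk hcode [hμ.vendor] until [Vorbis.L.start_decoder.cut4] span [Vorbis.L.textLo, Vorbis.L.textHi] side (v_side)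
  have hinv : abiInv s_115bc8 := by v_inv
  have hat : InAt u₀ g i A6 A6c Ai A pc_ERR s_115bc8 :=
    h.move w_mem w_rip (w_kept .rsp rfl) (w_kept .rbp rfl) (w_kept .r14 rfl) (w_kept .rbx rfl) hinv
  refine ReachVia.done (hat.toERR ?_)
  rw [w_kept .rax rfl]
  exact hrax

/-- **One loopRound of loop 4055**, from its head with the counter `j`: an exit of the segment, or the head again with `j + 1`
(and `j < 64`: the measure `64 − j` decreases). -/
theorem loopRound (Lay : Layout) (hLay : Lay.hi = 0x1000000) (μ : Microarch) (hμ : UserX.MicroOK μ) (u₀ : State)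
    (hcode : HasCodeNat Lay u₀ Vorbis.L.start_decoder.entry Vorbis.Code.code_start_decoder.nat Vorbis.L.start_decoder.size)
    (h_gb : ∀ (others : List Obj) (frames : List (Nat × FrameLayout)) (Blk : Block → Prop) (len : Nat), Calls Lay μ Vorbis.WayInv (Vorbis.conv u₀) Vorbis.L.get_bits.entry (Vorbis.Spec.get_bits.spec others frames Blk len))
    (h_st1 : Asan.SmallCheck Lay μ Vorbis.WayInv (Vorbis.CodeOK u₀) [.rax, .rdx] 1 Vorbis.L.__asan_store1_noabort.entry)
    (h_ld1 : Asan.SmallCheck Lay μ Vorbis.WayInv (Vorbis.CodeOK u₀) [.rax, .rdx] 1 Vorbis.L.__asan_load1_noabort.entry)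
    (h_sm : ∀ (others : List Obj) (frames : List (Nat × FrameLayout)) (A : Arena), Calls Lay μ Vorbis.WayInv (Vorbis.conv u₀) Vorbis.L.setup_malloc.entry (Vorbis.Spec.setup_malloc.spec others frames A))
    (h_st8 : Asan.SmallCheck Lay μ Vorbis.WayInv (Vorbis.CodeOK u₀) [.rax, .rcx, .rdx] 8 Vorbis.L.__asan_store8_noabort.entry)
    (h_err : ∀ (others : List Obj) (frames : List (Nat × FrameLayout)), Calls Lay μ Vorbis.WayInv (Vorbis.conv u₀) Vorbis.L.error.entry (Vorbis.Spec.error.spec others frames))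
    (g : Ghost) (i j : Nat) (v : State) (hh : HeadJ u₀ g i j v) :
    ReachVia Lay μ WayInv v
      (fun w => (AtR5 u₀ g i w ∨ AtERR u₀ g w) ∨ (HeadJ u₀ g i (j + 1) w ∧ j < 64)) := by
  obtain ⟨A6, A6c, A, h, hj, hj64⟩ := hh
  refine (walk_test Lay hLay μ hμ u₀ hcode h_gb h_ld1 h_sm g i A6 A6c A j v h hj hj64).trans ?_
  intro w hw
  rcases hw with hbody | halloc
  · -- `j < cls`: the body
    have hjlt : j < 64 := by
      obtain ⟨_, _, _, _, _, h64⟩ := hbody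
      exact h64
    refine (walk_b1 Lay hLay μ hμ u₀ hcode h_gb g i j w hbody).trans ?_
    intro w1 h1
    refine (walk_b2 Lay hLay μ hμ u₀ hcode h_gb h_st1 g i j w1 h1).trans ?_
    intro w2 h2
    rcases h2 with h254 | hhead
    · refine (walk_b3 Lay hLay μ hμ u₀ hcode h_st1 g i j w2 h254).mono ?_
      intro w3 h3
      exact Or.inr ⟨h3, hjlt⟩
    · exact ReachVia.done (Or.inr ⟨hhead, hjlt⟩)
  · -- `cls ≤ j`: the allocation, its store, the test
    refine (walk_alloc Lay hLay μ hμ u₀ hcode h_st8 h_err g i w halloc).trans ?_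
    intro w1 h1
    rcases h1 with h5 | herr
    · exact ReachVia.done (Or.inl (Or.inl h5))
    · refine (walk_err Lay hLay μ hμ u₀ hcode g i w1 herr).mono ?_
      intro w2 h2
      exact Or.inl (Or.inr h2)

end Vorbis.Spec.start_decoder_R4

/-- **Segment R4 of `start_decoder`** (0x115bdc → 0x115cef ∨ 0x113b22): `j = 0`, then loop 4055 by `ReachVia.loop` with the
invariant `HeadJ` and the measure `64 − r13`. -/
theorem Vorbis.Spec.Worked.start_decoder_R4_ok : Vorbis.Spec.start_decoder_R4.Statement := by
  unfold Vorbis.Spec.start_decoder_R4.Statement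
  intro Lay hLay μ hμ u₀ hcode h_gb h_st1 h_ld1 h_sm h_st8 h_err
  intro g i v hat
  obtain ⟨A6, A6c, A, hb⟩ := hat
  refine (Vorbis.Spec.start_decoder_R4.walk_entry Lay hLay μ hμ u₀ hcode g i A6 A6c A v hb).trans ?_
  intro w hw
  have hloop := X86.User.ReachVia.loop (L := Lay) (μ := μ) (I := Vorbis.WayInv)
    (Inv := fun s => ∃ j, Vorbis.Spec.start_decoder_R4.HeadJ u₀ g i j s)
    (Post := fun s => Vorbis.Spec.StartDecoder.AtR5 u₀ g i s ∨ Vorbis.Spec.StartDecoder.AtERR u₀ g s)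
    (fun s => 64 - (s.reg .r13).toNat) ?_ w ⟨0, hw⟩
  · exact hloop
  · intro s hs
    obtain ⟨j, hj⟩ := hs
    refine (Vorbis.Spec.start_decoder_R4.loopRound Lay hLay μ hμ u₀ hcode h_gb h_st1 h_ld1 h_sm h_st8 h_err g i j s hj).mono ?_
    intro s' h'
    rcases h' with hp | ⟨hh, hjlt⟩
    · exact Or.inl hp
    · refine Or.inr ⟨⟨j + 1, hh⟩, ?_⟩
      obtain ⟨_, _, _, _, e1, _⟩ := hj
      obtain ⟨_, _, _, _, e2, _⟩ := hh
      rw [e1, e2, Vorbis.toNat_addr j (by omega), Vorbis.toNat_addr (j + 1) (by omega)]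
      omega
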